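-- pv_equiv track=rewrite | github.com/josemarquezjaramillo/crypto-rl-portfolio | data/data_builder.py | _find_nan_runs
-- ===== SOURCE A (Python) =====
-- def _find_nan_runs(isnan_arr):
--     """
--     Find contiguous NaN runs in a boolean array (True = NaN).
--     Returns a list of (start_idx, end_idx) inclusive.
--     """
--     runs = []
--     n = len(isnan_arr)
--     i = 0
--     while i < n:
--         if isnan_arr[i]:
--             start = i
--             while i + 1 < n and isnan_arr[i + 1]:
--                 i += 1
--             end = i
--             runs.append((start, end))
--         i += 1
--     return runs
-- ===== SOURCE B (Python) =====
-- def _find_nan_runs(isnan_arr):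
--     """
--     Find contiguous NaN runs in a boolean array (True = NaN).
--     Returns a list of (start_idx, end_idx) inclusive.
--     """
--     n = len(isnan_arr)
--     starts = [i for i in range(n) if isnan_arr[i] and (i == 0 or not isnan_arr[i - 1])]
--     ends = [i for i in range(n) if isnan_arr[i] and (i == n - 1 or not isnan_arr[i + 1])]
--     return list(zip(starts, ends))
-- ===== Notes on version B (the rewrite author's own statement) =====
-- stated objective: idiomatic
-- what changed: Replaces the stateful outer/inner while-loop scan with a boundary computation: one comprehension collects run starts (True with no True predecessor), one collects run ends (True with no True successor), and the runs are zip-paired.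
import Mathlib
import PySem

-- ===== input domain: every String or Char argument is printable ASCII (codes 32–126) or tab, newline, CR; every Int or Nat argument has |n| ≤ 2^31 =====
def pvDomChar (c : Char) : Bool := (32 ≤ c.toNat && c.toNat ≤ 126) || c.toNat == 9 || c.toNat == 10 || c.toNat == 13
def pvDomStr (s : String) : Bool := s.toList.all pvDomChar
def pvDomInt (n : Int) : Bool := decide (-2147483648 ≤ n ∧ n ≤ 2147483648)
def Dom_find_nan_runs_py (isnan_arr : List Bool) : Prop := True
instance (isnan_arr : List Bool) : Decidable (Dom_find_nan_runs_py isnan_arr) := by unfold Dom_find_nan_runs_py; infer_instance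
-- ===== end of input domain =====

-- B replaces A's stateful scan (outer while + inner run-consuming while) by computing run
-- start and end boundaries in two comprehensions and zip-pairing them (idiomatic; same cost).

-- ===== PORT A =====
-- inner while loop of A: 'while i + 1 < n and isnan_arr[i + 1]: i += 1', returns the final i
def pvInnerA (arr : List Bool) (n i : Nat) : Nat :=
  if i + 1 < n ∧ arr.getD (i + 1) false then pvInnerA arr n (i + 1) else i
termination_by n - i
decreasing_by omega

-- termination fact for the outer loop (it steps to pvInnerA … + 1); cited by pvOuterA's decreasing_by
theorem pvInnerA_ge (arr : List Bool) (n i : Nat) : i ≤ pvInnerA arr n i := by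
  fun_induction pvInnerA with
  | case1 i h ih => omega
  | case2 i h => omega

-- outer while loop of A, carrying the 'runs' accumulator
def pvOuterA (arr : List Bool) (n i : Nat) (runs : List (Int × Int)) : List (Int × Int) :=
  if i < n then
    if arr.getD i false then
      let e := pvInnerA arr n i
      pvOuterA arr n (e + 1) (runs ++ [((i : Int), (e : Int))])
    else pvOuterA arr n (i + 1) runs
  else runs
termination_by n - i
decreasing_by
  · have := pvInnerA_ge arr n i; omega
  · omega

def find_nan_runs_py (isnan_arr : List Bool) : List (Int × Int) :=
  pvOuterA isnan_arr isnan_arr.length 0 []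

-- ===== PORT B =====
def find_nan_runs_py_alt (isnan_arr : List Bool) : List (Int × Int) :=
  let n := isnan_arr.length
  let starts := (List.range n).filter
      (fun i => isnan_arr.getD i false && (i == 0 || !isnan_arr.getD (i - 1) false))
  let ends := (List.range n).filter
      (fun i => isnan_arr.getD i false && (i == n - 1 || !isnan_arr.getD (i + 1) false))
  (starts.zip ends).map (fun p => ((p.1 : Int), (p.2 : Int)))

-- ===== PRECONDITION & SPEC =====
def Spec_find_nan_runs_py (isnan_arr : List Bool) (out : List (Int × Int)) : Prop := out = find_nan_runs_py_alt isnan_arr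
instance (isnan_arr : List Bool) (out : List (Int × Int)) : Decidable (Spec_find_nan_runs_py isnan_arr out) := by unfold Spec_find_nan_runs_py; infer_instance

-- ===== CLAIM (what is proved, stated in full; the proofs are below) =====
def Claim_equal_find_nan_runs_py : Prop := ∀ (isnan_arr : List Bool), Dom_find_nan_runs_py isnan_arr → Spec_find_nan_runs_py isnan_arr (find_nan_runs_py isnan_arr)

-- ===== LEMMAS AND PROOFS =====

-- accumulator-free version of A's scan, over Nat index pairs: the hub of the proof
def pvSpecI (arr : List Bool) (i : Nat) : List (Nat × Nat) :=
  if i < arr.length then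
    if arr.getD i false then
      let e := pvInnerA arr arr.length i
      (i, e) :: pvSpecI arr (e + 1)
    else pvSpecI arr (i + 1)
  else []
termination_by arr.length - i
decreasing_by
  · have := pvInnerA_ge arr arr.length i; omega
  · omega

theorem pvInnerA_lt (arr : List Bool) (n i : Nat) : i < n → pvInnerA arr n i < n := by
  fun_induction pvInnerA with
  | case1 i h ih => intro _; exact ih h.1
  | case2 i h => intro hi; exact hi

theorem pvInnerA_stop (arr : List Bool) (n i : Nat) :
    ¬ (pvInnerA arr n i + 1 < n ∧ arr.getD (pvInnerA arr n i + 1) false) := by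
  fun_induction pvInnerA with
  | case1 i h ih => exact ih
  | case2 i h => exact h

theorem pvInnerA_all_true (arr : List Bool) (n i : Nat) :
    arr.getD i false = true → ∀ j, i ≤ j → j ≤ pvInnerA arr n i → arr.getD j false = true := by
  fun_induction pvInnerA with
  | case1 i h ih =>
      intro hi j h1 h2
      rcases Nat.eq_or_lt_of_le h1 with rfl | h1'
      · exact hi
      · exact ih h.2 j h1' h2
  | case2 i h =>
      intro hi j h1 h2
      have : j = i := le_antisymm h2 h1
      subst this; exact hi

-- A's accumulator loop appends pvSpecI's result (cast to Int) to the accumulator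
theorem pvOuterA_eq (arr : List Bool) (i : Nat) (runs : List (Int × Int)) :
    pvOuterA arr arr.length i runs
      = runs ++ (pvSpecI arr i).map (fun p => ((p.1 : Int), (p.2 : Int))) := by
  fun_induction pvSpecI arr i generalizing runs with
  | case1 i h1 h2 e ih =>
      rw [pvOuterA]
      simp only [h1, if_true, h2, List.map_cons]
      rw [ih]
      simp
      rfl
  | case2 i h1 h2 ih =>
      rw [pvOuterA]
      simp only [h1, if_true, h2, Bool.false_eq_true, if_false]
      exact ih runs
  | case3 i h1 =>
      rw [pvOuterA]
      simp [h1]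

-- B's two filter predicates, named for the proofs
def pvSP (arr : List Bool) : Nat → Bool :=
  fun i => arr.getD i false && (i == 0 || !arr.getD (i - 1) false)
def pvEP (arr : List Bool) : Nat → Bool :=
  fun i => arr.getD i false && (i == arr.length - 1 || !arr.getD (i + 1) false)

-- main invariant: on any suffix starting at a position not strictly inside a run,
-- the start (resp. end) filter picks exactly the first (resp. second) components of pvSpecI
theorem pv_filters_eq (arr : List Bool) (i : Nat)
    (H : i = 0 ∨ arr.getD (i - 1) false = false ∨ arr.getD i false = false) :
    (List.range' i (arr.length - i)).filter (pvSP arr) = (pvSpecI arr i).map Prod.fst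
    ∧ (List.range' i (arr.length - i)).filter (pvEP arr) = (pvSpecI arr i).map Prod.snd := by
  fun_induction pvSpecI arr i with
  | case1 i h1 h2 e ih =>
      have he : pvInnerA arr arr.length i = e := rfl
      have hprev : i = 0 ∨ arr.getD (i - 1) false = false := by
        rcases H with h | h | h
        · exact Or.inl h
        · exact Or.inr h
        · rw [h2] at h; cases h
      have hge := pvInnerA_ge arr arr.length i
      have hlt := pvInnerA_lt arr arr.length i h1
      have hstop := pvInnerA_stop arr arr.length i
      have hall := pvInnerA_all_true arr arr.length i h2
      rw [he] at hge hlt hstop hall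
      have hnext : arr.getD (e + 1) false = false := by
        by_cases hc : e + 1 < arr.length
        · by_cases hb : arr.getD (e + 1) false = true
          · exact absurd ⟨hc, hb⟩ hstop
          · simpa using hb
        · exact List.getD_eq_default _ _ (by omega)
      obtain ⟨ihs, ihe⟩ := ih (Or.inr (Or.inr hnext))
      have hsplit : List.range' i (arr.length - i)
          = List.range' i (e + 1 - i) ++ List.range' (e + 1) (arr.length - (e + 1)) := by
        have h3 : arr.length - i = (e + 1 - i) + (arr.length - (e + 1)) := by omega
        have h4 : i + (e + 1 - i) = e + 1 := by omega
        rw [h3, ← List.range'_append_1, h4]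
      have h2' : arr[i]?.getD false = true := by
        simpa [List.getD_eq_getElem?_getD] using h2
      have hall' : ∀ j, i ≤ j → j ≤ e → arr[j]?.getD false = true := by
        intro j a b; simpa [List.getD_eq_getElem?_getD] using hall j a b
      have hSPi : pvSP arr i = true := by
        rcases hprev with rfl | hp
        · simp [pvSP, h2']
        · have hp' : arr[i - 1]?.getD false = false := by
            simpa [List.getD_eq_getElem?_getD] using hp
          simp [pvSP, h2', hp']
      have hSPmid : ∀ j, i + 1 ≤ j → j ≤ e → pvSP arr j = false := by
        intro j hj1 hj2
        have hj := hall' j (by omega) hj2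
        have hjm := hall' (j - 1) (by omega) (by omega)
        have hj0 : (j == 0) = false := by simp; omega
        simp [pvSP, hj, hjm, hj0]
      have hEPe : pvEP arr e = true := by
        have hge' := hall' e (by omega) (le_refl e)
        have hnext' : arr[e + 1]?.getD false = false := by
          simpa [List.getD_eq_getElem?_getD] using hnext
        by_cases hc : (e == arr.length - 1) = true
        · simp [pvEP, hge', hc]
        · simp [pvEP, hge', hc, hnext']
      have hEPmid : ∀ j, i ≤ j → j + 1 ≤ e → pvEP arr j = false := by
        intro j hj1 hj2
        have hj := hall' j hj1 (by omega)
        have hjn := hall' (j + 1) (by omega) hj2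
        have hjl : (j == arr.length - 1) = false := by simp; omega
        simp [pvEP, hj, hjn, hjl]
      have hblockS : (List.range' i (e + 1 - i)).filter (pvSP arr) = [i] := by
        have h5 : e + 1 - i = (e - i) + 1 := by omega
        rw [h5, List.range'_succ, List.filter_cons_of_pos hSPi]
        have : (List.range' (i + 1) (e - i)).filter (pvSP arr) = [] := by
          apply List.filter_eq_nil_iff.mpr
          intro x hx
          rw [List.mem_range'_1] at hx
          simp [hSPmid x hx.1 (by omega)]
        rw [this]
      have hblockE : (List.range' i (e + 1 - i)).filter (pvEP arr) = [e] := by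
        have h5 : e + 1 - i = (e - i) + 1 := by omega
        have h6 : i + (e - i) = e := by omega
        rw [h5, List.range'_1_concat, h6, List.filter_append]
        have : (List.range' i (e - i)).filter (pvEP arr) = [] := by
          apply List.filter_eq_nil_iff.mpr
          intro x hx
          rw [List.mem_range'_1] at hx
          simp [hEPmid x hx.1 (by omega)]
        rw [this, List.filter_cons_of_pos hEPe]
        simp
      constructor
      · rw [hsplit, List.filter_append, hblockS, ihs]; simp
      · rw [hsplit, List.filter_append, hblockE, ihe]; simp
  | case2 i h1 h2 ih =>
      have hfalse : arr.getD i false = false := by simpa using h2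
      obtain ⟨ihs, ihe⟩ := ih (Or.inr (Or.inl (by simpa using hfalse)))
      have hcons : List.range' i (arr.length - i) = i :: List.range' (i + 1) (arr.length - (i + 1)) := by
        have h3 : arr.length - i = (arr.length - (i + 1)) + 1 := by omega
        rw [h3, List.range'_succ]
      have hfalse' : arr[i]?.getD false = false := by
        simpa [List.getD_eq_getElem?_getD] using hfalse
      constructor
      · rw [hcons, List.filter_cons_of_neg (by simp [pvSP, hfalse']), ihs]
      · rw [hcons, List.filter_cons_of_neg (by simp [pvEP, hfalse']), ihe]
  | case3 i h1 =>
      have : arr.length - i = 0 := by omega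
      simp [this]

-- B computes pvSpecI too
theorem pv_alt_eq (arr : List Bool) :
    find_nan_runs_py_alt arr = (pvSpecI arr 0).map (fun p => ((p.1 : Int), (p.2 : Int))) := by
  obtain ⟨hs, he⟩ := pv_filters_eq arr 0 (Or.inl rfl)
  unfold find_nan_runs_py_alt
  simp only [List.range_eq_range', Nat.sub_zero] at *
  rw [show (fun i => arr.getD i false && (i == 0 || !arr.getD (i - 1) false)) = pvSP arr from rfl,
      show (fun i => arr.getD i false && (i == arr.length - 1 || !arr.getD (i + 1) false)) = pvEP arr from rfl,
      hs, he]
  exact congrArg (List.map _) (List.zip_of_prod rfl rfl).symm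

-- ===== VERDICT (by name: the statement is the Claim_ definition above) =====
theorem find_nan_runs_py_spec : Claim_equal_find_nan_runs_py := by
  intro arr _
  unfold Spec_find_nan_runs_py
  rw [pv_alt_eq]
  unfold find_nan_runs_py
  rw [pvOuterA_eq]
  simp
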